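-- pv_equiv track=rewrite | github.com/swanhong/matrix-fhe-lattigo | references/poly_mult.py | find_valid_N_values
-- ===== SOURCE A (Python) =====
-- def find_valid_N_values(min_N, max_N):
--     """
--     Find all valid N values (N = 2^a * 3^b with a >= 1, b >= 0) in the given range.
--
--     Args:
--         min_N: Minimum N value (inclusive)
--         max_N: Maximum N value (inclusive)
--
--     Returns:
--         List of valid N values sorted in ascending order
--     """
--     valid_N_values = []
--
--     # Generate all possible combinations of 2^a * 3^b
--     a = 1  # Start with a = 1 since we need a >= 1
--     while 2**a <= max_N:
--         b = 0  # Start with b = 0 since b >= 0 is allowed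
--         while 2**a * 3**b <= max_N:
--             N = 2**a * 3**b
--             if min_N <= N <= max_N:
--                 valid_N_values.append(N)
--             b += 1
--         a += 1
--
--     return sorted(valid_N_values)
-- ===== SOURCE B (Python) =====
-- def find_valid_N_values(min_N, max_N):
--     """Merge-based generation: recursively double v starting from 2; at each
--     level merge in the chain of 3-multiples.  Every N = 2^a*3^b (a>=1) is
--     produced exactly once and each list is built already sorted, so no final
--     sort is needed."""
--
--     def merge(xs, ys):
--         out = []
--         i = j = 0
--         while i < len(xs) and j < len(ys):
--             x, y = xs[i], ys[j]
--             if x < y: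
--                 out.append(x)
--                 i += 1
--             elif y < x:
--                 out.append(y)
--                 j += 1
--             else:
--                 out.append(x)
--                 i += 1
--                 j += 1
--         out.extend(xs[i:])
--         out.extend(ys[j:])
--         return out
--
--     def threes(v):
--         # sorted in-range values v * 3^j, j >= 0
--         out = []
--         while v <= max_N:
--             if v >= min_N:
--                 out.append(v)
--             v *= 3
--         return out
--
--     def gen(v):
--         # sorted in-range values v * 2^i * 3^j, i, j >= 0
--         if v > max_N:
--             return []
--         head = [v] if v >= min_N else []
--         return head + merge(gen(2 * v), threes(3 * v))
--
--     return gen(2)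
-- ===== Notes on version B (the rewrite author's own statement) =====
-- stated objective: alternative
-- what changed: Replaces the nested exponent loops plus a final sort by a recursive merge-based (Hamming-style) generator that expands v -> 2v,3v from 2 and merges the two sorted branch lists with dedup, producing the list already in ascending order.
import Mathlib
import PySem

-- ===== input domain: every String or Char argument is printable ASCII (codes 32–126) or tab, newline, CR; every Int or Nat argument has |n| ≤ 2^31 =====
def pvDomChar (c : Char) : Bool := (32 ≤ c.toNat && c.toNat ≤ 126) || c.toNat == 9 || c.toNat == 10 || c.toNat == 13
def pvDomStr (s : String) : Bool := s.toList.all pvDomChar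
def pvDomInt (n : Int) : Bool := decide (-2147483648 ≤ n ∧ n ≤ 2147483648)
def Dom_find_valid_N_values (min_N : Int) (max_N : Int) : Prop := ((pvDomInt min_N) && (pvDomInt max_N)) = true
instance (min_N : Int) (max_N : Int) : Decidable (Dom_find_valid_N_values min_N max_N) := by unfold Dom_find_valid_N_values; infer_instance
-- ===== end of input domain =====

-- B replaces the nested exponent loops + final sort by a recursive merge-based
-- (Hamming-style) generator that produces the list already in ascending order.

-- ===== PORT A =====
-- inner 'while 2**a * 3**b <= max_N' loop (fuel 64 is exact on Dom: max_N ≤ 2^31 < 3^64)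
def pvAinner (min_N max_N : Int) (a b : Nat) (fuel : Nat) (acc : List Int) : List Int :=
  match fuel with
  | 0 => acc
  | f+1 =>
    if (2:Int)^a * 3^b ≤ max_N then
      pvAinner min_N max_N a (b+1) f
        (acc ++ (if min_N ≤ (2:Int)^a * 3^b ∧ (2:Int)^a * 3^b ≤ max_N then [(2:Int)^a * 3^b] else []))
    else acc

-- outer 'while 2**a <= max_N' loop (fuel 64 is exact on Dom: max_N ≤ 2^31 < 2^(1+64))
def pvAouter (min_N max_N : Int) (a : Nat) (fuel : Nat) (acc : List Int) : List Int :=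
  match fuel with
  | 0 => acc
  | f+1 =>
    if (2:Int)^a ≤ max_N then
      pvAouter min_N max_N (a+1) f (pvAinner min_N max_N a 0 64 acc)
    else acc

def find_valid_N_values (min_N : Int) (max_N : Int) : List Int :=
  PySem.List.sorted (pvAouter min_N max_N 1 64 []) (fun x => x) false

-- ===== PORT B =====
-- two-pointer merge of two sorted lists, dropping duplicates across them
def pvMerge : List Int → List Int → List Int
  | [], ys => ys
  | x::xs, [] => x::xs
  | x::xs, y::ys =>
    if x < y then x :: pvMerge xs (y::ys)
    else if y < x then y :: pvMerge (x::xs) ys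
    else x :: pvMerge xs ys
termination_by xs ys => xs.length + ys.length

-- 'while v <= max_N: ... v *= 3' chain of 3-multiples (fuel 64 exact on Dom)
def pvThrees (min_N max_N : Int) (v : Int) (fuel : Nat) : List Int :=
  match fuel with
  | 0 => []
  | f+1 =>
    if v ≤ max_N then
      (if min_N ≤ v then [v] else []) ++ pvThrees min_N max_N (3*v) f
    else []

-- gen(v): sorted in-range values v * 2^i * 3^j (fuel 64 exact on Dom)
def pvGen (min_N max_N : Int) (v : Int) (fuel : Nat) : List Int :=
  match fuel with
  | 0 => []
  | f+1 =>
    if max_N < v then []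
    else
      (if min_N ≤ v then [v] else []) ++
        pvMerge (pvGen min_N max_N (2*v) f) (pvThrees min_N max_N (3*v) 64)

def find_valid_N_values_alt (min_N : Int) (max_N : Int) : List Int :=
  pvGen min_N max_N 2 64

-- ===== PRECONDITION & SPEC =====
def Spec_find_valid_N_values (min_N : Int) (max_N : Int) (out : List Int) : Prop := out = find_valid_N_values_alt min_N max_N
instance (min_N : Int) (max_N : Int) (out : List Int) : Decidable (Spec_find_valid_N_values min_N max_N out) := by unfold Spec_find_valid_N_values; infer_instance

-- ===== CLAIM (what is proved, stated in full; the proofs are below) =====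
def Claim_equal_find_valid_N_values : Prop := ∀ (min_N : Int) (max_N : Int), Dom_find_valid_N_values min_N max_N → Spec_find_valid_N_values min_N max_N (find_valid_N_values min_N max_N)

-- ===== LEMMAS AND PROOFS =====

lemma nat23 : ∀ (i : ℕ) {i' j j' : ℕ}, 2^i * 3^j = 2^i' * 3^j' → i = i' ∧ j = j' := by
  intro i i' j j' h
  have h2 := congrArg (fun n => n.factorization 2) h
  have h3 := congrArg (fun n => n.factorization 3) h
  simp [Nat.factorization_mul, Nat.prime_two, Nat.prime_three, Nat.Prime.factorization] at h2 h3
  constructor <;> omega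

lemma pv_pow23_inj {i j i' j' : ℕ} (h : (2:ℤ)^i * 3^j = 2^i' * 3^j') : i = i' ∧ j = j' := by
  have : ((2^i * 3^j : ℕ) : ℤ) = ((2^i' * 3^j' : ℕ) : ℤ) := by push_cast; exact h
  exact nat23 i (Nat.cast_injective this)

lemma pow3_mono {b j : ℕ} (hbj : b ≤ j) : (3:ℤ)^b ≤ 3^j :=
  pow_le_pow_right₀ (by norm_num) hbj

lemma pvAinner_mem (min_N max_N : Int) (a : Nat) (fuel : Nat) : ∀ (b : Nat) (acc : List Int),
    max_N < (2:Int)^a * 3^(b+fuel) → ∀ (x : Int),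
    (x ∈ pvAinner min_N max_N a b fuel acc ↔
      x ∈ acc ∨ ∃ j, b ≤ j ∧ x = (2:Int)^a * 3^j ∧ min_N ≤ x ∧ x ≤ max_N) := by
  induction fuel with
  | zero =>
    intro b acc h x
    simp only [pvAinner, iff_self_or]
    rintro ⟨j, hbj, rfl, hmin, hmax⟩
    have h2 : (0:ℤ) < 2^a := by positivity
    have hmono := mul_le_mul_of_nonneg_left (pow3_mono hbj) h2.le
    simp only [Nat.add_zero] at h
    linarith
  | succ f ih =>
    intro b acc h x
    rw [pvAinner]
    by_cases hg : (2:Int)^a * 3^b ≤ max_N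
    · rw [if_pos hg]
      rw [ih (b+1) _ (by linarith [show (2:Int)^a*3^(b+(f+1)) = 2^a*3^((b+1)+f) from by ring_nf]) x]
      simp only [List.mem_append]
      constructor
      · rintro ((hx | hx) | ⟨j, hbj, hr⟩)
        · exact Or.inl hx
        · have : x = (2:Int)^a*3^b ∧ min_N ≤ (2:Int)^a*3^b := by
            by_cases hm : min_N ≤ (2:Int)^a*3^b ∧ (2:Int)^a*3^b ≤ max_N
            · simp [hm] at hx; exact ⟨hx, hm.1⟩
            · simp [hm] at hx
          exact Or.inr ⟨b, le_rfl, this.1, this.1 ▸ this.2, this.1 ▸ hg⟩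
        · exact Or.inr ⟨j, by omega, hr⟩
      · rintro (hx | ⟨j, hbj, rfl, hmin, hmax⟩)
        · exact Or.inl (Or.inl hx)
        · rcases Nat.eq_or_lt_of_le hbj with rfl | hbj'
          · exact Or.inl (Or.inr (by simp [hmin, hmax]))
          · exact Or.inr ⟨j, by omega, rfl, hmin, hmax⟩
    · rw [if_neg hg]
      simp only [iff_self_or]
      rintro ⟨j, hbj, rfl, hmin, hmax⟩
      have h2 : (0:ℤ) < 2^a := by positivity
      have hmono := mul_le_mul_of_nonneg_left (pow3_mono hbj) h2.le
      linarith [not_le.1 hg]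

lemma pvAinner_nodup (min_N max_N : Int) (a : Nat) (fuel : Nat) : ∀ (b : Nat) (acc : List Int),
    acc.Nodup → (∀ x ∈ acc, ∀ j, b ≤ j → x ≠ (2:Int)^a * 3^j) →
    (pvAinner min_N max_N a b fuel acc).Nodup := by
  induction fuel with
  | zero => intro b acc hnd _; simpa [pvAinner] using hnd
  | succ f ih =>
    intro b acc hnd hfresh
    rw [pvAinner]
    by_cases hg : (2:Int)^a * 3^b ≤ max_N
    · rw [if_pos hg]
      apply ih (b+1)
      · by_cases hm : min_N ≤ (2:Int)^a*3^b ∧ (2:Int)^a*3^b ≤ max_N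
        · rw [if_pos hm, List.nodup_append]
          refine ⟨hnd, List.nodup_singleton _, ?_⟩
          intro y hy z hz
          rw [List.mem_singleton] at hz
          exact hz ▸ hfresh y hy b le_rfl
        · rw [if_neg hm]; simp only [List.append_nil]; exact hnd
      · intro x hx j hbj
        rcases List.mem_append.1 hx with hx | hx
        · exact hfresh x hx j (by omega)
        · by_cases hm : min_N ≤ (2:Int)^a*3^b ∧ (2:Int)^a*3^b ≤ max_N
          · rw [if_pos hm] at hx
            simp at hx
            subst hx
            intro hEq
            have := (pv_pow23_inj hEq).2
            omega
          · rw [if_neg hm] at hx; simp at hx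
    · rw [if_neg hg]; exact hnd

lemma pvAouter_mem (min_N max_N : Int) (h3 : max_N < (3:Int)^64) (fuel : Nat) :
    ∀ (a : Nat) (acc : List Int), max_N < (2:Int)^(a+fuel) → ∀ (x : Int),
    (x ∈ pvAouter min_N max_N a fuel acc ↔
      x ∈ acc ∨ ∃ i j, a ≤ i ∧ x = (2:Int)^i * 3^j ∧ min_N ≤ x ∧ x ≤ max_N) := by
  induction fuel with
  | zero =>
    intro a acc h x
    simp only [pvAouter, iff_self_or]
    rintro ⟨i, j, hai, rfl, hmin, hmax⟩
    have h1 : (2:ℤ)^a ≤ 2^i := pow_le_pow_right₀ (by norm_num) hai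
    have h2 : (1:ℤ) ≤ 3^j := one_le_pow₀ (by norm_num)
    have hmono := mul_le_mul_of_nonneg_left h2 (pow_pos (show (0:ℤ) < 2 by norm_num) i).le
    simp only [mul_one] at hmono
    simp only [Nat.add_zero] at h
    linarith
  | succ f ih =>
    intro a acc h x
    rw [pvAouter]
    by_cases hg : (2:Int)^a ≤ max_N
    · rw [if_pos hg]
      have hin : max_N < (2:Int)^a * 3^(0+64) := by
        have h2 : (1:ℤ) ≤ 2^a := one_le_pow₀ (by norm_num)
        have h4 : (3:ℤ)^(0+64) = 3^64 := by norm_num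
        rw [h4]
        nlinarith [pow_pos (show (0:ℤ) < 3 by norm_num) 64]
      rw [ih (a+1) _ (by linarith [show (2:Int)^(a+(f+1)) = 2^((a+1)+f) from by ring_nf]) x,
        pvAinner_mem min_N max_N a 64 0 acc hin x]
      constructor
      · rintro ((hx | ⟨j, _, hr⟩) | ⟨i, j, hai, hr⟩)
        · exact Or.inl hx
        · exact Or.inr ⟨a, j, le_rfl, hr⟩
        · exact Or.inr ⟨i, j, by omega, hr⟩
      · rintro (hx | ⟨i, j, hai, hr⟩)
        · exact Or.inl (Or.inl hx)
        · rcases Nat.eq_or_lt_of_le hai with rfl | hai'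
          · exact Or.inl (Or.inr ⟨j, Nat.zero_le j, hr⟩)
          · exact Or.inr ⟨i, j, by omega, hr⟩
    · rw [if_neg hg]
      simp only [iff_self_or]
      rintro ⟨i, j, hai, rfl, hmin, hmax⟩
      have h1 : (2:ℤ)^a ≤ 2^i := pow_le_pow_right₀ (by norm_num) hai
      have h2 : (1:ℤ) ≤ 3^j := one_le_pow₀ (by norm_num)
      have hmono := mul_le_mul_of_nonneg_left h2 (pow_pos (show (0:ℤ) < 2 by norm_num) i).le
      simp only [mul_one] at hmono
      linarith [not_le.1 hg]

lemma pvAouter_nodup (min_N max_N : Int) (h3 : max_N < (3:Int)^64) (fuel : Nat) :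
    ∀ (a : Nat) (acc : List Int), acc.Nodup →
    (∀ x ∈ acc, ∀ i j, a ≤ i → x ≠ (2:Int)^i * 3^j) →
    (pvAouter min_N max_N a fuel acc).Nodup := by
  induction fuel with
  | zero => intro a acc hnd _; simpa [pvAouter] using hnd
  | succ f ih =>
    intro a acc hnd hfresh
    rw [pvAouter]
    by_cases hg : (2:Int)^a ≤ max_N
    · rw [if_pos hg]
      have hin : max_N < (2:Int)^a * 3^(0+64) := by
        have h2 : (1:ℤ) ≤ 2^a := one_le_pow₀ (by norm_num)
        have h4 : (3:ℤ)^(0+64) = 3^64 := by norm_num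
        rw [h4]
        nlinarith [pow_pos (show (0:ℤ) < 3 by norm_num) 64]
      apply ih (a+1)
      · exact pvAinner_nodup min_N max_N a 64 0 acc hnd
          (fun x hx j _ => hfresh x hx a j le_rfl)
      · intro x hx i j hai
        rcases (pvAinner_mem min_N max_N a 64 0 acc hin x).1 hx with hx' | ⟨j', _, rfl, _⟩
        · exact hfresh x hx' i j (by omega)
        · intro hEq
          have := (pv_pow23_inj hEq).1
          omega
    · rw [if_neg hg]; exact hnd


lemma pvMerge_mem (xs ys : List Int) (x : Int) :
    x ∈ pvMerge xs ys ↔ x ∈ xs ∨ x ∈ ys := by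
  fun_induction pvMerge xs ys with
  | case1 => simp [pvMerge]
  | case2 => simp [pvMerge]
  | case3 a as b bs h ih => simp [pvMerge, h, ih]; tauto
  | case4 a as b bs h h' ih => simp [pvMerge, h, h', ih]; tauto
  | case5 a as b bs h h' ih =>
    have : a = b := le_antisymm (not_lt.1 h') (not_lt.1 h)
    simp [pvMerge, h, h', ih, this]; tauto

lemma pvMerge_sorted (xs ys : List Int) (hx : xs.Pairwise (· < ·)) (hy : ys.Pairwise (· < ·)) :
    (pvMerge xs ys).Pairwise (· < ·) := by
  fun_induction pvMerge xs ys with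
  | case1 => simpa using hy
  | case2 => simpa using hx
  | case3 a as b bs h ih =>
    rw [List.pairwise_cons] at hx
    rw [List.pairwise_cons]
    refine ⟨?_, ih hx.2 hy⟩
    intro z hz
    rcases (pvMerge_mem _ _ _).1 hz with hzz | hzz
    · exact hx.1 z hzz
    · rcases List.mem_cons.1 hzz with rfl | hzz
      · exact h
      · exact lt_trans h ((List.pairwise_cons.1 hy).1 z hzz)
  | case4 a as b bs h h' ih =>
    rw [List.pairwise_cons] at hy
    rw [List.pairwise_cons]
    refine ⟨?_, ih hx hy.2⟩
    intro z hz
    rcases (pvMerge_mem _ _ _).1 hz with hzz | hzz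
    · rcases List.mem_cons.1 hzz with rfl | hzz
      · exact h'
      · exact lt_trans h' ((List.pairwise_cons.1 hx).1 z hzz)
    · exact hy.1 z hzz
  | case5 a as b bs h h' ih =>
    have hab : a = b := le_antisymm (not_lt.1 h') (not_lt.1 h)
    rw [List.pairwise_cons] at hx hy
    rw [List.pairwise_cons]
    refine ⟨?_, ih hx.2 hy.2⟩
    intro z hz
    rcases (pvMerge_mem _ _ _).1 hz with hzz | hzz
    · exact hx.1 z hzz
    · exact hab ▸ hy.1 z hzz


lemma pvThrees_mem (min_N max_N : Int) (fuel : Nat) : ∀ (v : Int), 1 ≤ v →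
    max_N < v * 3^fuel → ∀ (x : Int),
    (x ∈ pvThrees min_N max_N v fuel ↔ ∃ j : Nat, x = v * 3^j ∧ min_N ≤ x ∧ x ≤ max_N) := by
  induction fuel with
  | zero =>
    intro v hv h x
    simp only [pvThrees, List.not_mem_nil, false_iff]
    rintro ⟨j, rfl, hmin, hmax⟩
    have h1 : (1:ℤ) ≤ 3^j := one_le_pow₀ (by norm_num)
    nlinarith
  | succ f ih =>
    intro v hv h x
    rw [pvThrees]
    by_cases hg : v ≤ max_N
    · have h' : max_N < 3*v * 3^f := by
        have : v * 3^(f+1) = 3*v*3^f := by ring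
        linarith [this ▸ h]
      rw [if_pos hg]
      simp only [List.mem_append]
      rw [ih (3*v) (by linarith) h' x]
      constructor
      · rintro (hx | ⟨j, rfl, hr⟩)
        · have hx' : x = v ∧ min_N ≤ v := by
            by_cases hm : min_N ≤ v <;> simp [hm] at hx
            exact ⟨hx, hm⟩
          exact ⟨0, by simpa using hx'.1, by simpa [hx'.1] using hx'.2, by rwa [hx'.1]⟩
        · exact ⟨j+1, by ring, hr⟩
      · rintro ⟨j, rfl, hmin, hmax⟩
        cases j with
        | zero => left; simp at hmin ⊢; simp [hmin]
        | succ j => right; exact ⟨j, by ring, by linarith [show v*3^(j+1) = 3*v*3^j from by ring], by linarith [show v*3^(j+1) = 3*v*3^j from by ring]⟩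
    · rw [if_neg hg]
      simp only [List.not_mem_nil, false_iff]
      rintro ⟨j, rfl, hmin, hmax⟩
      have h1 : (1:ℤ) ≤ 3^j := one_le_pow₀ (by norm_num)
      nlinarith [not_le.1 hg]

lemma pvThrees_lb (min_N max_N : Int) (fuel : Nat) : ∀ (v : Int), 0 ≤ v → ∀ (x : Int),
    x ∈ pvThrees min_N max_N v fuel → v ≤ x := by
  induction fuel with
  | zero => intro v _ x hx; simp [pvThrees] at hx
  | succ f ih =>
    intro v hv x hx
    rw [pvThrees] at hx
    by_cases hg : v ≤ max_N
    · rw [if_pos hg] at hx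
      rcases List.mem_append.1 hx with hx | hx
      · by_cases hm : min_N ≤ v <;> simp [hm] at hx
        omega
      · have := ih (3*v) (by linarith) x hx; linarith
    · simp [if_neg hg] at hx

lemma pvThrees_sorted (min_N max_N : Int) (fuel : Nat) : ∀ (v : Int), 1 ≤ v →
    (pvThrees min_N max_N v fuel).Pairwise (· < ·) := by
  induction fuel with
  | zero => intro v hv; simp [pvThrees]
  | succ f ih =>
    intro v hv
    rw [pvThrees]
    by_cases hg : v ≤ max_N
    · rw [if_pos hg]
      have htail := ih (3*v) (by linarith)
      by_cases hm : min_N ≤ v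
      · rw [if_pos hm]
        simp only [List.singleton_append, List.pairwise_cons]
        exact ⟨fun z hz => by have := pvThrees_lb min_N max_N f (3*v) (by linarith) z hz; linarith, htail⟩
      · rw [if_neg hm]; simpa using htail
    · simp [if_neg hg]

lemma pvGen_lb (min_N max_N : Int) (fuel : Nat) : ∀ (v : Int), 0 ≤ v → ∀ (x : Int),
    x ∈ pvGen min_N max_N v fuel → v ≤ x := by
  induction fuel with
  | zero => intro v _ x hx; simp [pvGen] at hx
  | succ f ih =>
    intro v hv x hx
    rw [pvGen] at hx
    by_cases hg : max_N < v
    · simp [if_pos hg] at hx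
    · rw [if_neg hg] at hx
      rcases List.mem_append.1 hx with hx | hx
      · by_cases hm : min_N ≤ v <;> simp [hm] at hx
        omega
      · rcases (pvMerge_mem _ _ _).1 hx with hx | hx
        · have := ih (2*v) (by linarith) x hx; linarith
        · have := pvThrees_lb min_N max_N 64 (3*v) (by linarith) x hx; linarith

lemma pvGen_sorted (min_N max_N : Int) (fuel : Nat) : ∀ (v : Int), 1 ≤ v →
    (pvGen min_N max_N v fuel).Pairwise (· < ·) := by
  induction fuel with
  | zero => intro v hv; simp [pvGen]
  | succ f ih =>
    intro v hv
    rw [pvGen]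
    by_cases hg : max_N < v
    · simp [if_pos hg]
    · rw [if_neg hg]
      have hmrg := pvMerge_sorted _ _ (ih (2*v) (by linarith))
        (pvThrees_sorted min_N max_N 64 (3*v) (by linarith))
      by_cases hm : min_N ≤ v
      · rw [if_pos hm]
        simp only [List.singleton_append, List.pairwise_cons]
        refine ⟨fun z hz => ?_, hmrg⟩
        rcases (pvMerge_mem _ _ _).1 hz with hz | hz
        · have := pvGen_lb min_N max_N f (2*v) (by linarith) z hz; linarith
        · have := pvThrees_lb min_N max_N 64 (3*v) (by linarith) z hz; linarith
      · rw [if_neg hm]; simpa using hmrg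

lemma pv_le_self (v : ℤ) (hv : 0 ≤ v) (i j : ℕ) : v ≤ v * 2^i * 3^j := by
  have h1 : (1:ℤ) ≤ 2^i := one_le_pow₀ (by norm_num)
  have h2 : (1:ℤ) ≤ 3^j := one_le_pow₀ (by norm_num)
  calc v = v*1*1 := by ring
    _ ≤ v * 2^i * 3^j :=
      mul_le_mul (mul_le_mul le_rfl h1 zero_le_one hv) h2 zero_le_one
        (mul_nonneg hv (by positivity))

lemma pvGen_mem (min_N max_N : Int) (h3 : max_N < (3:Int)^64) (fuel : Nat) : ∀ (v : Int), 1 ≤ v →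
    max_N < v * 2^fuel → ∀ (x : Int),
    (x ∈ pvGen min_N max_N v fuel ↔ ∃ i j : Nat, x = v * 2^i * 3^j ∧ min_N ≤ x ∧ x ≤ max_N) := by
  induction fuel with
  | zero =>
    intro v hv h x
    simp only [pvGen, List.not_mem_nil, false_iff]
    rintro ⟨i, j, rfl, hmin, hmax⟩
    have := pv_le_self v (by linarith) i j
    simp at h
    linarith
  | succ f ih =>
    intro v hv h x
    rw [pvGen]
    by_cases hg : max_N < v
    · simp only [if_pos hg, List.not_mem_nil, false_iff]
      rintro ⟨i, j, rfl, hmin, hmax⟩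
      have := pv_le_self v (by linarith) i j
      linarith
    · rw [if_neg hg]
      have hvmax := not_lt.1 hg
      have hih := ih (2*v) (by linarith) (by linarith [show v*2^(f+1) = 2*v*2^f from by ring])
      have hth := pvThrees_mem min_N max_N 64 (3*v) (by linarith)
        (by nlinarith [one_le_pow₀ (show (1:ℤ) ≤ 3 by norm_num) (n := 64)])
      simp only [List.mem_append]
      rw [pvMerge_mem, hih x, hth x]
      constructor
      · rintro (hx | ⟨i, j, rfl, hr⟩ | ⟨j, rfl, hr⟩)
        · have hx' : x = v ∧ min_N ≤ v := by
            by_cases hm : min_N ≤ v <;> simp [hm] at hx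
            exact ⟨hx, hm⟩
          exact ⟨0, 0, by simp [hx'.1], by simp [hx'.1, hx'.2], by simpa [hx'.1] using hvmax⟩
        · exact ⟨i+1, j, by ring, hr⟩
        · exact ⟨0, j+1, by ring, hr⟩
      · rintro ⟨i, j, rfl, hmin, hmax⟩
        cases i with
        | succ i =>
          refine Or.inr (Or.inl ⟨i, j, by ring, ?_, ?_⟩) <;>
            [ (linarith [show v*2^(i+1)*3^j = 2*v*2^i*3^j from by ring]);
              (linarith [show v*2^(i+1)*3^j = 2*v*2^i*3^j from by ring]) ]
        | zero =>
          cases j with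
          | succ j =>
            refine Or.inr (Or.inr ⟨j, by ring, ?_, ?_⟩) <;>
              [ (linarith [show v*2^0*3^(j+1) = 3*v*3^j from by ring]);
                (linarith [show v*2^0*3^(j+1) = 3*v*3^j from by ring]) ]
          | zero =>
            left
            have : v * 2^0 * 3^0 = v := by ring
            rw [this] at hmin
            simp [hmin]

-- ===== VERDICT (by name: the statement is the Claim_ definition above) =====
theorem find_valid_N_values_spec : Claim_equal_find_valid_N_values := by
  intro min_N max_N hdom
  unfold Spec_find_valid_N_values find_valid_N_values find_valid_N_values_alt
  unfold Dom_find_valid_N_values pvDomInt at hdom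
  simp only [Bool.and_eq_true, decide_eq_true_eq] at hdom
  have hmax : max_N ≤ 2147483648 := hdom.2.2
  have h3 : max_N < (3:Int)^64 := lt_of_le_of_lt hmax (by norm_num)
  have h2o : max_N < (2:Int)^(1+64) := lt_of_le_of_lt hmax (by norm_num)
  have hgf : max_N < 2 * (2:Int)^64 := lt_of_le_of_lt hmax (by norm_num)
  have hL := pvAouter_mem min_N max_N h3 64 1 [] h2o
  have hG := pvGen_mem min_N max_N h3 64 2 (by norm_num) hgf
  have nodupL : (pvAouter min_N max_N 1 64 []).Nodup :=
    pvAouter_nodup min_N max_N h3 64 1 [] List.nodup_nil (by simp)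
  have sortG := pvGen_sorted min_N max_N 64 2 (by norm_num)
  have nodupG : (pvGen min_N max_N 2 64).Nodup := sortG.imp ne_of_lt
  have hmem : ∀ x, x ∈ pvGen min_N max_N 2 64 ↔ x ∈ pvAouter min_N max_N 1 64 [] := by
    intro x
    rw [hG x, hL x]
    simp only [List.not_mem_nil, false_or]
    constructor
    · rintro ⟨i, j, rfl, hr⟩
      exact ⟨i+1, j, by omega, by ring, hr⟩
    · rintro ⟨i, j, hi, rfl, hr⟩
      obtain ⟨i', rfl⟩ : ∃ i', i = i' + 1 := ⟨i - 1, by omega⟩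
      exact ⟨i', j, by ring, hr⟩
  have perm : (pvGen min_N max_N 2 64).Perm (pvAouter min_N max_N 1 64 []) :=
    (List.perm_ext_iff_of_nodup nodupG nodupL).2 hmem
  exact PySem.List.sorted_eq_of_perm_of_pairwise_lt _ _ _ perm sortG
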